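-- pv_equiv track=rewrite | github.com/MrBrantCode/unitest_baseline | mut_generate/mist_train_taco/taco_7812/solution.py | find_train_partner
-- ===== SOURCE A (Python) =====
-- def find_train_partner(T, berth_numbers):
--     results = []
--     for n in berth_numbers:
--         m = int(n // 8)
--         l = n - m * 8
--         if l == 7:
--             results.append(f"{n + 1}SU")
--         elif l == 0:
--             results.append(f"{n - 1}SL")
--         elif l == 6:
--             results.append(f"{n - 3}UB")
--         elif l == 3:
--             results.append(f"{n + 3}UB")
--         elif l == 5:
--             results.append(f"{n - 3}MB")
--         elif l == 2:
--             results.append(f"{n + 3}MB")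
--         elif l == 4:
--             results.append(f"{n - 3}LB")
--         else:
--             results.append(f"{n + 3}LB")
--     return results
-- ===== SOURCE B (Python) =====
-- def find_train_partner(T, berth_numbers):
--     # Berths repeat in compartments of 8: positions 0..5 (zero-based k = (n-1) % 8)
--     # are LB,MB,UB,LB,MB,UB and pair by the involution k -> (k + 3) % 6; the side
--     # positions 6 (SL) and 7 (SU) pair by k -> 13 - k.  The partner berth is
--     # n + (k' - k) and the suffix is the partner's own berth type.
--     results = []
--     for n in berth_numbers:
--         k = (n - 1) % 8
--         if k < 6:
--             kp = (k + 3) % 6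
--             suffix = "LB" if kp % 3 == 0 else ("MB" if kp % 3 == 1 else "UB")
--         else:
--             kp = 13 - k
--             suffix = "SL" if kp == 6 else "SU"
--         results.append(f"{n + kp - k}{suffix}")
--     return results
-- ===== Notes on version B (the rewrite author's own statement) =====
-- stated objective: alternative
-- what changed: Replaces the eight-way if/elif dispatch by the pairing involution on zero-based positions k = (n-1) % 8 (k -> (k+3) % 6 for the longitudinal berths, k -> 13-k for the side berths), deriving both the partner number and its suffix arithmetically instead of enumerating cases.
import Mathlib
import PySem

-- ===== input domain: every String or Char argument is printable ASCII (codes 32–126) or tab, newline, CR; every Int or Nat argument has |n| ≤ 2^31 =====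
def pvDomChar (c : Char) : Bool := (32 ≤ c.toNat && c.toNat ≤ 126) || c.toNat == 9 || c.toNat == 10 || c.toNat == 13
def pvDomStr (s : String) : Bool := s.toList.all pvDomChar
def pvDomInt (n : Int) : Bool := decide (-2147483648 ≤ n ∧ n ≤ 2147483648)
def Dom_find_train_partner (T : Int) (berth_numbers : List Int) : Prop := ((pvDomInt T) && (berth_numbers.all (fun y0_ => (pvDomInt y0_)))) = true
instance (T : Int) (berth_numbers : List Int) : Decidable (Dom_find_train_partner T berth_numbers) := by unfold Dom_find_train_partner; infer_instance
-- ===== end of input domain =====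

-- B replaces the eight-way if/elif dispatch by the pairing involution on zero-based
-- positions k = (n-1) % 8 (k ↦ (k+3) % 6 for longitudinal berths, k ↦ 13-k for the
-- side berths), computing partner number and suffix arithmetically (objective: alternative).

-- ===== PORT A =====
def find_train_partner (T : Int) (berth_numbers : List Int) : List String :=
  berth_numbers.foldl (fun results n =>
    let m := PySem.Int.floordiv n 8
    let l := n - m * 8
    if l = 7 then results ++ [PySem.Int.toStr (n + 1) ++ "SU"]
    else if l = 0 then results ++ [PySem.Int.toStr (n - 1) ++ "SL"]
    else if l = 6 then results ++ [PySem.Int.toStr (n - 3) ++ "UB"]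
    else if l = 3 then results ++ [PySem.Int.toStr (n + 3) ++ "UB"]
    else if l = 5 then results ++ [PySem.Int.toStr (n - 3) ++ "MB"]
    else if l = 2 then results ++ [PySem.Int.toStr (n + 3) ++ "MB"]
    else if l = 4 then results ++ [PySem.Int.toStr (n - 3) ++ "LB"]
    else results ++ [PySem.Int.toStr (n + 3) ++ "LB"]) []

-- ===== PORT B =====
def find_train_partner_alt (T : Int) (berth_numbers : List Int) : List String :=
  berth_numbers.foldl (fun results n =>
    let k := PySem.Int.mod (n - 1) 8
    if k < 6 then
      let kp := PySem.Int.mod (k + 3) 6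
      let suffix := if PySem.Int.mod kp 3 = 0 then "LB"
                    else if PySem.Int.mod kp 3 = 1 then "MB" else "UB"
      results ++ [PySem.Int.toStr (n + kp - k) ++ suffix]
    else
      let kp := 13 - k
      let suffix := if kp = 6 then "SL" else "SU"
      results ++ [PySem.Int.toStr (n + kp - k) ++ suffix]) []

-- ===== PRECONDITION & SPEC =====
def Spec_find_train_partner (T : Int) (berth_numbers : List Int) (out : List String) : Prop := out = find_train_partner_alt T berth_numbers
instance (T : Int) (berth_numbers : List Int) (out : List String) : Decidable (Spec_find_train_partner T berth_numbers out) := by unfold Spec_find_train_partner; infer_instance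

-- ===== CLAIM (what is proved, stated in full; the proofs are below) =====
def Claim_equal_find_train_partner : Prop := ∀ (T : Int) (berth_numbers : List Int), Dom_find_train_partner T berth_numbers → Spec_find_train_partner T berth_numbers (find_train_partner T berth_numbers)

-- ===== LEMMAS AND PROOFS =====

-- A's loop body applied to one element produces the same string as B's loop body.
theorem pv_step_eq (n : Int) :
    (let m := PySem.Int.floordiv n 8
     let l := n - m * 8
     if l = 7 then PySem.Int.toStr (n + 1) ++ "SU"
     else if l = 0 then PySem.Int.toStr (n - 1) ++ "SL"
     else if l = 6 then PySem.Int.toStr (n - 3) ++ "UB"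
     else if l = 3 then PySem.Int.toStr (n + 3) ++ "UB"
     else if l = 5 then PySem.Int.toStr (n - 3) ++ "MB"
     else if l = 2 then PySem.Int.toStr (n + 3) ++ "MB"
     else if l = 4 then PySem.Int.toStr (n - 3) ++ "LB"
     else PySem.Int.toStr (n + 3) ++ "LB")
    = (let k := PySem.Int.mod (n - 1) 8
       if k < 6 then
         let kp := PySem.Int.mod (k + 3) 6
         let suffix := if PySem.Int.mod kp 3 = 0 then "LB"
                       else if PySem.Int.mod kp 3 = 1 then "MB" else "UB"
         PySem.Int.toStr (n + kp - k) ++ suffix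
       else
         let kp := 13 - k
         let suffix := if kp = 6 then "SL" else "SU"
         PySem.Int.toStr (n + kp - k) ++ suffix) := by
  have hl : n - PySem.Int.floordiv n 8 * 8 = n % 8 := by
    have := PySem.Int.floordiv_mul_add_mod n 8
    have hm : PySem.Int.mod n 8 = n % 8 := PySem.Int.mod_eq_emod_of_pos (by norm_num)
    omega
  have hk : PySem.Int.mod (n - 1) 8 = (n - 1) % 8 :=
    PySem.Int.mod_eq_emod_of_pos (by norm_num)
  have h0 : 0 ≤ n % 8 := Int.emod_nonneg n (by norm_num)
  have h8 : n % 8 < 8 := Int.emod_lt_of_pos n (by norm_num)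
  simp only [hl, hk]
  have hcase : n % 8 = 0 ∨ n % 8 = 1 ∨ n % 8 = 2 ∨ n % 8 = 3 ∨ n % 8 = 4 ∨
      n % 8 = 5 ∨ n % 8 = 6 ∨ n % 8 = 7 := by omega
  rcases hcase with h|h|h|h|h|h|h|h
  · have hk' : (n - 1) % 8 = 7 := by omega
    rw [h, hk']
    norm_num [PySem.Int.mod, Int.fmod]
    congr 1
    omega
  · have hk' : (n - 1) % 8 = 0 := by omega
    rw [h, hk']
    norm_num [PySem.Int.mod, Int.fmod]
  · have hk' : (n - 1) % 8 = 1 := by omega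
    rw [h, hk']
    norm_num [PySem.Int.mod, Int.fmod]
    congr 1
    omega
  · have hk' : (n - 1) % 8 = 2 := by omega
    rw [h, hk']
    norm_num [PySem.Int.mod, Int.fmod]
    congr 1
    omega
  · have hk' : (n - 1) % 8 = 3 := by omega
    rw [h, hk']
    norm_num [PySem.Int.mod, Int.fmod]
  · have hk' : (n - 1) % 8 = 4 := by omega
    rw [h, hk']
    norm_num [PySem.Int.mod, Int.fmod]
    congr 1
    omega
  · have hk' : (n - 1) % 8 = 5 := by omega
    rw [h, hk']
    norm_num [PySem.Int.mod, Int.fmod]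
    congr 1
    omega
  · have hk' : (n - 1) % 8 = 6 := by omega
    rw [h, hk']
    norm_num [PySem.Int.mod, Int.fmod]
    congr 1
    omega

theorem find_train_partner_spec : Claim_equal_find_train_partner := by
  intro T bs _
  unfold Spec_find_train_partner find_train_partner find_train_partner_alt
  congr 1
  funext results n
  have h := pv_step_eq n
  simp only at h ⊢
  split_ifs at h ⊢ <;> simp_all
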